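-- pv_equiv track=rewrite | github.com/MakiAfom/Mauchline-learning-Problems- | python/visible_buildings.py | visible_buildings
-- ===== SOURCE A (Python) =====
-- def visible_buildings(grid, m, n):
--     """
--     Given a 2D grid of building heights, find the maximum number of buildings that can be seen from the sky.
--
--     Args:
--         grid (List[List[int]]): A 2D grid of building heights.
--         m (int): The number of rows in the grid.
--         n (int): The number of columns in the grid.
--
--     Returns:
--         int: The total number of visible buildings.
--     """
--     def count_visible_buildings(grid, m, n):
--         # Number of rows and columns
--         m = len(grid)
--         n = len(grid[0]) if m > 0 else 0
--
--         # Number of visible buildings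
--         num_visible_buildings = 0
--
--         # Visibility row-wise
--         for row in grid:
--             max_height_count = 0
--             for height in row:
--                 if height > max_height_count:
--                     num_visible_buildings += 1
--                     max_height_count = height
--
--         # Visibility column-wise
--         for col in range(n):
--             max_height_count = 0
--             for row in range(m):
--                 if grid[row][col] > max_height_count:
--                     num_visible_buildings += 1
--                     max_height_count = grid[row][col]
--
--         return num_visible_buildings
--
--     return count_visible_buildings(grid, m, n)
-- ===== SOURCE B (Python) =====
-- def visible_buildings(grid, m, n):
--     # A building is visible iff its height is positive and strictly exceeds every
--     # earlier building in its line; check that directly per building by recursion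
--     # on the line, scanning the whole prefix each time (no running maximum kept).
--     def records(line):
--         def go(prefix, rest):
--             if not rest:
--                 return 0
--             h, tail = rest[0], rest[1:]
--             here = 1 if h > 0 and all(x < h for x in prefix) else 0
--             return here + go(prefix + [h], tail)
--         return go([], list(line))
--
--     c = len(grid[0]) if grid else 0
--     cols = [[row[j] for row in grid] for j in range(c)]
--     return sum(records(line) for line in list(grid) + cols)
-- ===== Notes on version B (the rewrite author's own statement) =====
-- stated objective: alternative
-- what changed: B decides visibility per building by recursively scanning the entire prefix of its line (h > 0 and all earlier elements < h), summing one shared helper over the rows and the transposed columns, instead of A's two iterative loop nests that thread a single running-maximum counter.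
import Mathlib
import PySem

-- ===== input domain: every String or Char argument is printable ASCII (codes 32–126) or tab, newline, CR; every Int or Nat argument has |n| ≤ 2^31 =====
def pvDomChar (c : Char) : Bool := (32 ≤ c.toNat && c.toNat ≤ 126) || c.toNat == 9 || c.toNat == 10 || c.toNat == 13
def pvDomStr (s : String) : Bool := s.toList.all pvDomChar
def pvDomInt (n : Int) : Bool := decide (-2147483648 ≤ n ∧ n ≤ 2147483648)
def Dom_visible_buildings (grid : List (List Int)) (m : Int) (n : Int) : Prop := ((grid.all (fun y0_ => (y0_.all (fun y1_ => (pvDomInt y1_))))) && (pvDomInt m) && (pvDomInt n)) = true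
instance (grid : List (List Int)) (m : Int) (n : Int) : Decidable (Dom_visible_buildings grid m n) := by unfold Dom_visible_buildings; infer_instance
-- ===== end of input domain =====

-- B decides visibility per building by recursively scanning the whole pfx of its line,
-- instead of A's iterative running-maximum loop nests; alternative decomposition, same results.

-- ===== PORT A =====
-- literal port of A: one counter threaded through a row-wise nest and an index-based
-- column-wise nest; grid[row][col] is ported with pyGet? (default only reached where
-- Python raises, which Pre_ excludes)
def visible_buildings (grid : List (List Int)) (m : Int) (n : Int) : Int :=
  let m' : Int := grid.length
  let n' : Int := if m' > 0 then (((PySem.List.pyGet? grid 0).getD []).length : Int) else 0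
  let afterRows : Int := grid.foldl
    (fun (num : Int) row =>
      (row.foldl
        (fun (s : Int × Int) height =>
          if height > s.2 then (s.1 + 1, height) else s)
        (num, 0)).1)
    0
  (PySem.List.pyRange 0 n' 1).foldl
    (fun (num : Int) col =>
      ((PySem.List.pyRange 0 m' 1).foldl
        (fun (s : Int × Int) row =>
          let h := PySem.List.pyGetD ((PySem.List.pyGet? grid row).getD []) col 0
          if h > s.2 then (s.1 + 1, h) else s)
        (num, 0)).1)
    afterRows

-- ===== PORT B =====
-- go pfx rest: count buildings of rest that are positive and beat every element of pfx
def go_alt (pfx : List Int) : List Int → Int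
  | [] => 0
  | h :: tail =>
      (if h > 0 ∧ ∀ x ∈ pfx, x < h then 1 else 0) + go_alt (pfx ++ [h]) tail

def records_alt (line : List Int) : Int := go_alt [] line

def visible_buildings_alt (grid : List (List Int)) (m : Int) (n : Int) : Int :=
  let c : Int := if grid ≠ [] then ((grid.headD []).length : Int) else 0
  let cols := (PySem.List.pyRange 0 c 1).map
    (fun j => grid.map (fun row => PySem.List.pyGetD row j 0))
  ((grid ++ cols).map records_alt).sum

-- ===== PRECONDITION & SPEC =====
-- Pre_ excludes exactly the ragged grids on which Python A raises IndexError (a row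
-- shorter than the first row); Python B raises there too.
def Pre_visible_buildings (grid : List (List Int)) (m : Int) (n : Int) : Prop :=
  ∀ row ∈ grid, (grid.headD []).length ≤ row.length
instance (grid : List (List Int)) (m : Int) (n : Int) : Decidable (Pre_visible_buildings grid m n) := by unfold Pre_visible_buildings; infer_instance
def pvWitness_visible_buildings : List (List Int) × Int × Int := ([[1, 2], [3, 1]], 2, 2)

def Spec_visible_buildings (grid : List (List Int)) (m : Int) (n : Int) (out : Int) : Prop := out = visible_buildings_alt grid m n
instance (grid : List (List Int)) (m : Int) (n : Int) (out : Int) : Decidable (Spec_visible_buildings grid m n out) := by unfold Spec_visible_buildings; infer_instance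

-- ===== CLAIM (what is proved, stated in full; the proofs are below) =====
def Claim_equal_visible_buildings : Prop := ∀ (grid : List (List Int)) (m : Int) (n : Int), Dom_visible_buildings grid m n → Pre_visible_buildings grid m n → Spec_visible_buildings grid m n (visible_buildings grid m n)

-- ===== LEMMAS AND PROOFS =====

-- the abstract record count of A's inner loop, starting from best-so-far b
def recCount : Int → List Int → Int
  | _, [] => 0
  | b, x :: r => (if x > b then 1 else 0) + recCount (max b x) r

-- A's inner loop computes recCount
theorem foldl_inner_recCount (row : List Int) : ∀ (c b : Int),
    (row.foldl (fun (s : Int × Int) h => if h > s.2 then (s.1 + 1, h) else s) (c, b)).1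
      = c + recCount b row := by
  induction row with
  | nil => intro c b; simp [recCount]
  | cons x r ih =>
    intro c b
    simp only [List.foldl_cons, recCount]
    by_cases hx : x > b
    · rw [if_pos hx, ih, if_pos hx, max_eq_right (le_of_lt hx)]; ring
    · rw [if_neg hx, ih, if_neg hx, max_eq_left (by omega)]; ring

-- strict dominance over a fold-max pfx = positivity plus dominance over each element
theorem foldl_max_lt (l : List Int) : ∀ (a x : Int),
    (l.foldl max a < x ↔ a < x ∧ ∀ y ∈ l, y < x) := by
  induction l with
  | nil => intro a x; simp
  | cons z r ih =>
    intro a x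
    simp only [List.foldl_cons, ih, List.mem_cons]
    constructor
    · rintro ⟨hm, hall⟩
      have := max_lt_iff.mp hm
      exact ⟨this.1, fun y hy => by rcases hy with rfl | hy; exact this.2; exact hall y hy⟩
    · rintro ⟨ha, hall⟩
      exact ⟨max_lt_iff.mpr ⟨ha, hall z (Or.inl rfl)⟩, fun y hy => hall y (Or.inr hy)⟩

-- B's recursion computes recCount from the fold-max of the accumulated pfx
theorem go_alt_eq_recCount (l : List Int) : ∀ (pre : List Int),
    go_alt pre l = recCount (pre.foldl max 0) l := by
  induction l with
  | nil => intro pre; simp [go_alt, recCount]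
  | cons h tail ih =>
    intro pre
    simp only [go_alt, recCount, ih]
    have hcond : (h > 0 ∧ ∀ x ∈ pre, x < h) ↔ pre.foldl max 0 < h := by
      rw [foldl_max_lt]
    have hmax : max (pre.foldl max 0) h = (pre ++ [h]).foldl max 0 := by
      simp [List.foldl_append]
    rw [← hmax]
    by_cases hc : h > 0 ∧ ∀ x ∈ pre, x < h
    · rw [if_pos hc, if_pos ((gt_iff_lt.mpr (hcond.mp hc)))]
    · rw [if_neg hc, if_neg (by rw [gt_iff_lt, ← hcond]; exact hc)]

theorem records_alt_eq (l : List Int) : records_alt l = recCount 0 l := by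
  simpa using go_alt_eq_recCount l []

-- generic: a foldl that only adds = init + sum of the mapped list
theorem foldl_add_sum (l : List Int) (g : Int → Int) : ∀ (init : Int),
    l.foldl (fun c j => c + g j) init = init + (l.map g).sum := by
  induction l with
  | nil => intro init; simp
  | cons x r ih => intro init; simp only [List.foldl_cons, List.map_cons, List.sum_cons, ih]; ring

-- row part: threading a counter through per-row record loops = sum of per-row recCounts
theorem rowPart_eq (grid : List (List Int)) : ∀ (init : Int),
    grid.foldl
      (fun (num : Int) row =>
        (row.foldl (fun (s : Int × Int) h => if h > s.2 then (s.1 + 1, h) else s) (num, 0)).1)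
      init = init + (grid.map (recCount 0)).sum := by
  induction grid with
  | nil => intro init; simp
  | cons r g ih =>
    intro init
    simp only [List.foldl_cons, List.map_cons, List.sum_cons]
    rw [foldl_inner_recCount, ih]
    ring

-- A's inner column loop over row indices = recCount of the materialised column
theorem colInner_eq (grid : List (List Int)) (col : Int) (num : Int) :
    ((PySem.List.pyRange 0 (grid.length : Int) 1).foldl
        (fun (s : Int × Int) row =>
          let h := PySem.List.pyGetD ((PySem.List.pyGet? grid row).getD []) col 0
          if h > s.2 then (s.1 + 1, h) else s)
        (num, 0)).1
      = num + recCount 0 (grid.map (fun row => PySem.List.pyGetD row col 0)) := by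
  have hfold := PySem.List.foldl_pyRange_zero_pyGetD' grid []
    (fun (s : Int × Int) (r : List Int) =>
      if PySem.List.pyGetD r col 0 > s.2 then (s.1 + 1, PySem.List.pyGetD r col 0) else s)
    (num, 0)
  have hbody : (fun (s : Int × Int) row =>
          let h := PySem.List.pyGetD ((PySem.List.pyGet? grid row).getD []) col 0
          if h > s.2 then (s.1 + 1, h) else s)
      = (fun (s : Int × Int) (j : Int) =>
          if PySem.List.pyGetD (PySem.List.pyGetD grid j []) col 0 > s.2
          then (s.1 + 1, PySem.List.pyGetD (PySem.List.pyGetD grid j []) col 0) else s) := by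
    funext s j
    simp [PySem.List.pyGetD]
  rw [hbody, hfold]
  rw [show (grid.foldl
      (fun (s : Int × Int) (r : List Int) =>
        if PySem.List.pyGetD r col 0 > s.2 then (s.1 + 1, PySem.List.pyGetD r col 0) else s)
      (num, 0))
    = ((grid.map (fun row => PySem.List.pyGetD row col 0)).foldl
        (fun (s : Int × Int) h => if h > s.2 then (s.1 + 1, h) else s) (num, 0)) by
    rw [List.foldl_map]]
  exact foldl_inner_recCount _ num 0

theorem visible_buildings_eq_alt (grid : List (List Int)) (m n : Int) :
    visible_buildings grid m n = visible_buildings_alt grid m n := by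
  unfold visible_buildings visible_buildings_alt
  have hw : (if (grid.length : Int) > 0 then (((PySem.List.pyGet? grid 0).getD []).length : Int) else 0)
      = (if grid ≠ [] then ((grid.headD []).length : Int) else 0) := by
    cases grid with
    | nil => simp
    | cons r g => simp
  simp only [hw]
  rw [rowPart_eq]
  have houter : ∀ (init : Int) (w : Int),
      (PySem.List.pyRange 0 w 1).foldl
        (fun (num : Int) col =>
          ((PySem.List.pyRange 0 (grid.length : Int) 1).foldl
            (fun (s : Int × Int) row =>
              let h := PySem.List.pyGetD ((PySem.List.pyGet? grid row).getD []) col 0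
              if h > s.2 then (s.1 + 1, h) else s)
            (num, 0)).1)
        init
      = init + ((PySem.List.pyRange 0 w 1).map
          (fun col => recCount 0 (grid.map (fun row => PySem.List.pyGetD row col 0)))).sum := by
    intro init w
    rw [← foldl_add_sum]
    apply PySem.List.foldl_congr_mem
    intro acc col _
    exact colInner_eq grid col acc
  rw [houter]
  rw [List.map_append, List.sum_append]
  rw [show (grid.map records_alt) = grid.map (recCount 0) from
    List.map_congr_left (fun r _ => records_alt_eq r)]
  rw [show ∀ w : Int, ((PySem.List.pyRange 0 w 1).map
        (fun j => grid.map (fun row => PySem.List.pyGetD row j 0))).map records_alt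
      = (PySem.List.pyRange 0 w 1).map
        (fun j => recCount 0 (grid.map (fun row => PySem.List.pyGetD row j 0))) from
    fun w => by
      rw [List.map_map]
      exact List.map_congr_left (fun j _ => records_alt_eq _)]
  ring

-- ===== VERDICT (by name: the statement is the Claim_ definition above) =====
theorem visible_buildings_spec : Claim_equal_visible_buildings := by
  intro grid m n _dom _pre
  exact visible_buildings_eq_alt grid m n
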